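-- pv_equiv track=rewrite | github.com/ddosang/AlgorithmStudy | 백준/골드/5_15686 : 치킨 배달.py | dist_chicken
-- ===== SOURCE A (Python) =====
-- def dist(home_x, home_y, chicken_x, chicken_y):
--     return abs(home_x - chicken_x) + abs(home_y - chicken_y)
--
-- def dist_chicken(homes, chickens):
--     dic = {}
--     for hx, hy in homes:
--         for cx, cy in chickens:
--             d = dist(hx, hy, cx, cy)
--
--             # 집에서 가장 가까운 치킨집 저장.
--             if not ((hx, hy) in dic.keys()):
--                 dic[(hx, hy)] = (cx, cy, d)
--             elif d < dic[(hx, hy)][2]: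
--                 dic[(hx, hy)] = (cx, cy, d)
--
--     chicken_candidates = set()
--     chicken_dist = 0
--     # 저장된 집에서 꺼내와서 거리 계산
--     for key, val in dic.items():
--         chicken_candidates.add((val[0], val[1]))
--         chicken_dist += val[2]
--
--     return len(chicken_candidates), chicken_dist
-- ===== SOURCE B (Python) =====
-- def dist_chicken(homes, chickens):
--     # Flatten all (home, chicken) pairs into distance-keyed triples, sort them once,
--     # then a single first-wins sweep assigns each home its nearest chicken.
--     triples = sorted(
--         ((abs(hx - cx) + abs(hy - cy), i, (hx, hy), (cx, cy))
--          for (hx, hy) in dict.fromkeys(homes)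
--          for i, (cx, cy) in enumerate(chickens)),
--         key=lambda t: (t[0], t[1]))
--     seen = set()
--     used = set()
--     total = 0
--     for d, i, h, c in triples:
--         if h not in seen:
--             seen.add(h)
--             used.add(c)
--             total += d
--     return len(used), total
-- ===== Notes on version B (the rewrite author's own statement) =====
-- stated objective: alternative
-- what changed: Replaces A's nested per-home dict-refinement loop plus a second aggregation pass with a flatten-sort-sweep algorithm: all (home, chicken) pairs become (distance, index) triples, sorted once, and a single first-wins sweep over the sorted list assigns each home its nearest chicken while accumulating the answer.
import Mathlib
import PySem

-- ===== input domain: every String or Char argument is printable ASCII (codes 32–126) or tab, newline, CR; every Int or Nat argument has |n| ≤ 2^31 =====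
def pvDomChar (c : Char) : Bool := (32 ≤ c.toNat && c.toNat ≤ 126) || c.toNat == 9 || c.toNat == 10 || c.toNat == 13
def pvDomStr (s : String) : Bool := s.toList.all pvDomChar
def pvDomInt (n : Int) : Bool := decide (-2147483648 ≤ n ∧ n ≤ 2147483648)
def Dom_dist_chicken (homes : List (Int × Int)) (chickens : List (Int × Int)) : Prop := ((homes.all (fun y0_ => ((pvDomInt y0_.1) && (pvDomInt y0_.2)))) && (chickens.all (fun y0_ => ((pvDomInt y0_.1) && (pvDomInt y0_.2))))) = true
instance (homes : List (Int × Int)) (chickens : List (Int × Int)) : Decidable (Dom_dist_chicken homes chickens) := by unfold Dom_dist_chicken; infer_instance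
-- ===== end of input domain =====

-- B replaces A's nested dict-refinement loop + second aggregation pass by flattening all
-- (home, chicken) pairs into triples, sorting them once by (distance, chicken index), and
-- doing a single first-wins sweep (objective: alternative — a sort-based algorithm of similar cost).

-- ===== PORT A =====
-- helper dist(home_x, home_y, chicken_x, chicken_y)
def pyDist (hx hy cx cy : Int) : Int := |hx - cx| + |hy - cy|

-- the body of A's inner 'for cx, cy in chickens' loop (named so the lemmas can cite it)
def aInner (h : Int × Int) (dic : PySem.Dict (Int × Int) (Int × Int × Int)) (c : Int × Int) :
    PySem.Dict (Int × Int) (Int × Int × Int) :=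
  let d := pyDist h.1 h.2 c.1 c.2
  match dic.get? h with
  | none => dic.insert h (c.1, c.2, d)
  | some v => if d < v.2.2 then dic.insert h (c.1, c.2, d) else dic

def dist_chicken (homes : List (Int × Int)) (chickens : List (Int × Int)) : Int × Int :=
  let dic : PySem.Dict (Int × Int) (Int × Int × Int) :=
    homes.foldl (fun dic h => chickens.foldl (aInner h) dic) PySem.Dict.empty
  let acc : PySem.Set (Int × Int) × Int :=
    dic.items.foldl
      (fun acc kv => (PySem.Set.add acc.1 (kv.2.1, kv.2.2.1), acc.2 + kv.2.2.2))
      (PySem.Set.empty, 0)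
  ((acc.1.length : Int), acc.2)

-- ===== PORT B =====
-- abs(hx - cx) + abs(hy - cy) of Source B's generator
def bKey (h c : Int × Int) : Int := |h.1 - c.1| + |h.2 - c.2|

-- the inner 'for i, (cx, cy) in enumerate(chickens)' of Source B's generator, for one home
def hTrip (h : Int × Int) (chickens : List (Int × Int)) :
    List (Int × Int × (Int × Int) × (Int × Int)) :=
  (PySem.List.enumerate chickens).map (fun ic => (bKey h ic.2, ic.1, h, ic.2))

-- the full generator: '... for (hx, hy) in dict.fromkeys(homes) for i, (cx, cy) in enumerate(chickens)'
def bTriples (homes chickens : List (Int × Int)) :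
    List (Int × Int × (Int × Int) × (Int × Int)) :=
  (PySem.List.dedup homes).flatMap (fun h => hTrip h chickens)

-- the body of Source B's sweep loop: first-wins on the home component
def bStep (acc : PySem.Set (Int × Int) × PySem.Set (Int × Int) × Int)
    (t : Int × Int × (Int × Int) × (Int × Int)) :
    PySem.Set (Int × Int) × PySem.Set (Int × Int) × Int :=
  if PySem.Set.contains acc.1 t.2.2.1 then acc
  else (PySem.Set.add acc.1 t.2.2.1, PySem.Set.add acc.2.1 t.2.2.2, acc.2.2 + t.1)

def dist_chicken_alt (homes : List (Int × Int)) (chickens : List (Int × Int)) : Int × Int :=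
  let triples := PySem.List.sorted2 (bTriples homes chickens) (fun t => t.1) (fun t => t.2.1)
  let acc := triples.foldl bStep (PySem.Set.empty, PySem.Set.empty, 0)
  ((acc.2.1.length : Int), acc.2.2)

-- ===== PRECONDITION & SPEC =====
def Spec_dist_chicken (homes : List (Int × Int)) (chickens : List (Int × Int)) (out : Int × Int) : Prop := out = dist_chicken_alt homes chickens
instance (homes : List (Int × Int)) (chickens : List (Int × Int)) (out : Int × Int) : Decidable (Spec_dist_chicken homes chickens out) := by unfold Spec_dist_chicken; infer_instance

-- ===== CLAIM (what is proved, stated in full; the proofs are below) =====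
def Claim_equal_dist_chicken : Prop := ∀ (homes : List (Int × Int)) (chickens : List (Int × Int)), Dom_dist_chicken homes chickens → Spec_dist_chicken homes chickens (dist_chicken homes chickens)

-- ===== LEMMAS AND PROOFS =====

-- ---------- A side: the dict A builds is 'best triple per distinct home' ----------

-- A's refinement of a current-best triple by the remaining chickens
def refineT (h : Int × Int) (v : Int × Int × Int) (cs : List (Int × Int)) : Int × Int × Int :=
  cs.foldl
    (fun v c => if pyDist h.1 h.2 c.1 c.2 < v.2.2 then (c.1, c.2, pyDist h.1 h.2 c.1 c.2) else v) v

-- the triple A ends up storing for home h when chickens = c :: cs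
def bestT (h c : Int × Int) (cs : List (Int × Int)) : Int × Int × Int :=
  refineT h (c.1, c.2, pyDist h.1 h.2 c.1 c.2) cs

lemma refineT_cons (h : Int × Int) (v : Int × Int × Int) (c : Int × Int) (cs : List (Int × Int)) :
    refineT h v (c :: cs)
      = refineT h (if pyDist h.1 h.2 c.1 c.2 < v.2.2 then (c.1, c.2, pyDist h.1 h.2 c.1 c.2) else v) cs := rfl

lemma refine_insert (h : Int × Int) (cs : List (Int × Int)) :
    ∀ (dic : PySem.Dict (Int × Int) (Int × Int × Int)) (v : Int × Int × Int),
      cs.foldl (aInner h) (dic.insert h v) = dic.insert h (refineT h v cs) := by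
  induction cs with
  | nil => intro dic v; rfl
  | cons c cs ih =>
    intro dic v
    have h1 : aInner h (dic.insert h v) c
        = dic.insert h (if pyDist h.1 h.2 c.1 c.2 < v.2.2 then (c.1, c.2, pyDist h.1 h.2 c.1 c.2) else v) := by
      simp only [aInner, PySem.Dict.get?_insert_self]
      split_ifs <;> simp [PySem.Dict.insert_insert_self]
    rw [List.foldl_cons, h1, ih, refineT_cons]

lemma inner_fresh (h : Int × Int) (dic : PySem.Dict (Int × Int) (Int × Int × Int))
    (hn : dic.get? h = none) (c : Int × Int) (cs : List (Int × Int)) :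
    (c :: cs).foldl (aInner h) dic = dic.insert h (bestT h c cs) := by
  rw [List.foldl_cons]
  have h1 : aInner h dic c = dic.insert h (c.1, c.2, pyDist h.1 h.2 c.1 c.2) := by
    simp [aInner, hn]
  rw [h1, refine_insert]; rfl

lemma refineT_min (h : Int × Int) (cs : List (Int × Int)) :
    ∀ v : Int × Int × Int,
      (refineT h v cs).2.2 ≤ v.2.2 ∧ ∀ x ∈ cs, (refineT h v cs).2.2 ≤ pyDist h.1 h.2 x.1 x.2 := by
  induction cs with
  | nil => intro v; simp [refineT]
  | cons c cs ih =>
    intro v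
    rw [refineT_cons]
    rcases ih (if pyDist h.1 h.2 c.1 c.2 < v.2.2 then (c.1, c.2, pyDist h.1 h.2 c.1 c.2) else v) with ⟨h1, h2⟩
    by_cases hd : pyDist h.1 h.2 c.1 c.2 < v.2.2
    · rw [if_pos hd] at h1 h2 ⊢
      have h1' : (refineT h (c.1, c.2, pyDist h.1 h.2 c.1 c.2) cs).2.2 ≤ pyDist h.1 h.2 c.1 c.2 := h1
      refine ⟨by omega, ?_⟩
      intro x hx
      rcases List.mem_cons.mp hx with rfl | hx
      · exact h1'
      · exact h2 x hx
    · rw [if_neg hd] at h1 h2 ⊢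
      refine ⟨h1, ?_⟩
      intro x hx
      rcases List.mem_cons.mp hx with rfl | hx
      · omega
      · exact h2 x hx

lemma inner_noop (h : Int × Int) (dic : PySem.Dict (Int × Int) (Int × Int × Int))
    (v : Int × Int × Int) (hv : dic.get? h = some v) (cs : List (Int × Int))
    (hmin : ∀ x ∈ cs, ¬ pyDist h.1 h.2 x.1 x.2 < v.2.2) :
    cs.foldl (aInner h) dic = dic := by
  induction cs with
  | nil => rfl
  | cons c cs ih =>
    have hc : ¬ pyDist h.1 h.2 c.1 c.2 < v.2.2 := hmin c List.mem_cons_self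
    have h1 : aInner h dic c = dic := by
      simp only [aInner, hv]
      rw [if_neg hc]
    rw [List.foldl_cons, h1]
    exact ih (fun x hx => hmin x (List.mem_cons_of_mem _ hx))

lemma dedup_concat (xs : List (Int × Int)) (x : Int × Int) :
    PySem.List.dedup (xs ++ [x])
      = if x ∈ xs then PySem.List.dedup xs else PySem.List.dedup xs ++ [x] := by
  simp only [PySem.List.dedup_eq_ofList, PySem.Set.ofList_eq_foldl, List.foldl_append,
    List.foldl_cons, List.foldl_nil]
  by_cases hx : x ∈ xs <;>
    simp [PySem.Set.add, ← PySem.Set.ofList_eq_foldl, PySem.Set.mem_ofList, hx]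

lemma build_items (c : Int × Int) (cs : List (Int × Int)) (homes : List (Int × Int)) :
    (homes.foldl (fun dic h => (c :: cs).foldl (aInner h) dic)
        (PySem.Dict.empty : PySem.Dict (Int × Int) (Int × Int × Int))).items
      = (PySem.List.dedup homes).map (fun h => (h, bestT h c cs)) := by
  induction homes using List.reverseRecOn with
  | nil => rfl
  | append_singleton homes h ih =>
    rw [List.foldl_append, List.foldl_cons, List.foldl_nil]
    set D := homes.foldl (fun dic h => (c :: cs).foldl (aInner h) dic)
        (PySem.Dict.empty : PySem.Dict (Int × Int) (Int × Int × Int)) with hD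
    have hkeys : D.keys = PySem.List.dedup homes := by
      simp only [PySem.Dict.keys, ih, List.map_map, Function.comp_def]
      simp
    have hnodup : D.keys.Nodup := by rw [hkeys]; exact PySem.List.nodup_dedup homes
    by_cases hm : h ∈ homes
    · have hmemd : h ∈ PySem.List.dedup homes := (PySem.List.mem_dedup homes h).mpr hm
      have hmem : (h, bestT h c cs) ∈ D.items := by
        rw [ih]; exact List.mem_map_of_mem hmemd
      have hget : D.get? h = some (bestT h c cs) :=
        PySem.Dict.get?_of_mem_items _ hmem hnodup
      have hmin : ∀ x ∈ c :: cs, ¬ pyDist h.1 h.2 x.1 x.2 < (bestT h c cs).2.2 := by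
        rcases refineT_min h cs (c.1, c.2, pyDist h.1 h.2 c.1 c.2) with ⟨h1, h2⟩
        have h1' : (bestT h c cs).2.2 ≤ pyDist h.1 h.2 c.1 c.2 := h1
        intro x hx
        rcases List.mem_cons.mp hx with rfl | hx
        · omega
        · have h2' : (bestT h c cs).2.2 ≤ pyDist h.1 h.2 x.1 x.2 := h2 x hx
          omega
      rw [inner_noop h D _ hget _ hmin, ih, dedup_concat, if_pos hm]
    · have hnone : D.get? h = none := by
        rw [PySem.Dict.get?_eq_none_iff_not_mem_keys, hkeys]
        exact fun hc => hm ((PySem.List.mem_dedup homes h).mp hc)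
      have hcont : D.contains h = false := by
        rw [PySem.Dict.contains_eq_isSome_get?, hnone]; rfl
      rw [inner_fresh h D hnone c cs]
      simp only [PySem.Dict.items_insert, hcont, Bool.false_eq_true, if_false, ih]
      rw [dedup_concat, if_neg hm, List.map_append]
      rfl

-- ---------- the common middle: per-home minimum over enumerate (strict-improvement fold) ----------

lemma pyDist_bKey (h c : Int × Int) : pyDist h.1 h.2 c.1 c.2 = bKey h c := rfl

-- running strict-improvement minimum over enumerate cs s from initial best m
def midF (h : Int × Int) (cs : List (Int × Int)) (s : Int) (m : Int × Int × (Int × Int)) :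
    Int × Int × (Int × Int) :=
  (PySem.List.enumerate cs s).foldl
    (fun m ic => if bKey h ic.2 < m.1 then (bKey h ic.2, ic.1, ic.2) else m) m

lemma midF_cons (h : Int × Int) (c : Int × Int) (cs : List (Int × Int)) (s : Int)
    (m : Int × Int × (Int × Int)) :
    midF h (c :: cs) s m = midF h cs (s + 1) (if bKey h c < m.1 then (bKey h c, s, c) else m) := by
  rw [midF, midF, PySem.List.enumerate_cons, List.foldl_cons]

-- the (d, i, chicken) minimum both programs select, chickens = c :: cs
def midE (h c : Int × Int) (cs : List (Int × Int)) : Int × Int × (Int × Int) :=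
  midF h cs 1 (bKey h c, 0, c)

-- A's refineT is midF with the index forgotten
lemma refineT_eq_midF (h : Int × Int) (cs : List (Int × Int)) :
    ∀ (s : Int) (m : Int × Int × (Int × Int)),
      refineT h (m.2.2.1, m.2.2.2, m.1) cs
        = ((midF h cs s m).2.2.1, (midF h cs s m).2.2.2, (midF h cs s m).1) := by
  induction cs with
  | nil => intro s m; simp [refineT, midF, PySem.List.enumerate_nil]
  | cons c cs ih =>
    intro s m
    rw [refineT_cons, midF_cons]
    simp only [pyDist_bKey]
    by_cases hd : bKey h c < m.1
    · rw [if_pos hd, if_pos hd]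
      exact ih (s + 1) (bKey h c, s, c)
    · rw [if_neg hd, if_neg hd]
      exact ih (s + 1) m

lemma bestT_eq_midE (h c : Int × Int) (cs : List (Int × Int)) :
    bestT h c cs = ((midE h c cs).2.2.1, (midE h c cs).2.2.2, (midE h c cs).1) := by
  have := refineT_eq_midF h cs 1 (bKey h c, 0, c)
  simpa [bestT, midE, pyDist_bKey] using this

-- the fold invariant: result is the initial value or a list element, lexicographically minimal
lemma midF_min (h : Int × Int) (cs : List (Int × Int)) :
    ∀ (s : Int) (m : Int × Int × (Int × Int)), m.2.1 < s →
      ((midF h cs s m) = m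
        ∨ ((midF h cs s m).1 = bKey h (midF h cs s m).2.2
            ∧ ((midF h cs s m).2.1, (midF h cs s m).2.2) ∈ PySem.List.enumerate cs s))
      ∧ ((midF h cs s m).1 < m.1 ∨ ((midF h cs s m).1 = m.1 ∧ (midF h cs s m).2.1 ≤ m.2.1))
      ∧ ∀ ic ∈ PySem.List.enumerate cs s,
          (midF h cs s m).1 < bKey h ic.2
            ∨ ((midF h cs s m).1 = bKey h ic.2 ∧ (midF h cs s m).2.1 ≤ ic.1) := by
  induction cs with
  | nil =>
    intro s m hm
    simp [midF, PySem.List.enumerate_nil]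
  | cons c cs ih =>
    intro s m hm
    rw [midF_cons]
    by_cases hd : bKey h c < m.1
    · rw [if_pos hd]
      rcases ih (s + 1) (bKey h c, s, c) (by simp) with ⟨hmem, hvm, hall⟩
      simp only at hvm
      refine ⟨?_, ?_, ?_⟩
      · rcases hmem with hr | ⟨h1, h2⟩
        · right
          rw [hr]
          exact ⟨rfl, by rw [PySem.List.enumerate_cons]; exact List.mem_cons_self⟩
        · right
          exact ⟨h1, by rw [PySem.List.enumerate_cons]; exact List.mem_cons_of_mem _ h2⟩
      · left; omega
      · intro ic hic
        rw [PySem.List.enumerate_cons] at hic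
        rcases List.mem_cons.mp hic with rfl | hic
        · simp only
          omega
        · exact hall ic hic
    · rw [if_neg hd]
      rcases ih (s + 1) m (by omega) with ⟨hmem, hvm, hall⟩
      refine ⟨?_, hvm, ?_⟩
      · rcases hmem with hr | ⟨h1, h2⟩
        · left; exact hr
        · right
          exact ⟨h1, by rw [PySem.List.enumerate_cons]; exact List.mem_cons_of_mem _ h2⟩
      · intro ic hic
        rw [PySem.List.enumerate_cons] at hic
        rcases List.mem_cons.mp hic with rfl | hic
        · simp only
          rcases hvm with hlt | ⟨he, hi⟩
          · left; omega
          · by_cases hq : (midF h cs (s + 1) m).1 = bKey h c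
            · right
              exact ⟨hq, by omega⟩
            · left; omega
        · exact hall ic hic

-- the triple Source B's sweep should pick for home h (chickens = c :: cs)
def midT (h c : Int × Int) (cs : List (Int × Int)) : Int × Int × (Int × Int) × (Int × Int) :=
  ((midE h c cs).1, (midE h c cs).2.1, h, (midE h c cs).2.2)

lemma mem_hTrip_iff (h : Int × Int) (chickens : List (Int × Int))
    (t : Int × Int × (Int × Int) × (Int × Int)) :
    t ∈ hTrip h chickens
      ↔ ∃ (k : Nat) (hk : k < chickens.length),
          t = (bKey h chickens[k], (k : Int), h, chickens[k]) := by
  simp only [hTrip, List.mem_map, PySem.List.mem_enumerate_iff]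
  constructor
  · rintro ⟨ic, ⟨k, hk, rfl⟩, rfl⟩
    exact ⟨k, hk, by simp⟩
  · rintro ⟨k, hk, rfl⟩
    exact ⟨((k : Int), chickens[k]), ⟨k, hk, by simp⟩, rfl⟩

lemma hTrip_home {h : Int × Int} {chickens : List (Int × Int)}
    {t : Int × Int × (Int × Int) × (Int × Int)} (ht : t ∈ hTrip h chickens) : t.2.2.1 = h := by
  rcases (mem_hTrip_iff h chickens t).mp ht with ⟨k, hk, rfl⟩; rfl

lemma hTrip_inj_i {h : Int × Int} {chickens : List (Int × Int)}
    {u v : Int × Int × (Int × Int) × (Int × Int)}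
    (hu : u ∈ hTrip h chickens) (hv : v ∈ hTrip h chickens) (hi : u.2.1 = v.2.1) : u = v := by
  rcases (mem_hTrip_iff h chickens u).mp hu with ⟨k1, hk1, rfl⟩
  rcases (mem_hTrip_iff h chickens v).mp hv with ⟨k2, hk2, rfl⟩
  have h1 : (k1 : Int) = (k2 : Int) := hi
  have h2 : k1 = k2 := by exact_mod_cast h1
  subst h2
  rfl

lemma midT_mem (h c : Int × Int) (cs : List (Int × Int)) :
    midT h c cs ∈ hTrip h (c :: cs) := by
  rcases midF_min h cs 1 (bKey h c, 0, c) (by simp) with ⟨hmem, _, _⟩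
  simp only [hTrip, List.mem_map, PySem.List.enumerate_cons]
  rcases hmem with hr | ⟨h1, h2⟩
  · refine ⟨(0, c), List.mem_cons_self, ?_⟩
    simp only [midT, midE, hr]
  · refine ⟨((midE h c cs).2.1, (midE h c cs).2.2), List.mem_cons_of_mem _ ?_, ?_⟩
    · exact h2
    · simp only [midT]
      rw [show (midE h c cs).1 = bKey h (midE h c cs).2.2 from h1]

lemma midT_min (h c : Int × Int) (cs : List (Int × Int)) :
    ∀ u ∈ hTrip h (c :: cs),
      (midT h c cs).1 < u.1 ∨ ((midT h c cs).1 = u.1 ∧ (midT h c cs).2.1 ≤ u.2.1) := by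
  rcases midF_min h cs 1 (bKey h c, 0, c) (by simp) with ⟨_, hvm, hall⟩
  simp only at hvm
  intro u hu
  simp only [hTrip, List.mem_map, PySem.List.enumerate_cons] at hu
  rcases hu with ⟨ic, hic, rfl⟩
  rcases List.mem_cons.mp hic with rfl | hic
  · -- u comes from the head chicken (index 0, key bKey h c)
    simp only [midT, midE]
    omega
  · rcases hall ic hic with hlt | ⟨he, hi⟩
    · left; exact hlt
    · right; exact ⟨he, hi⟩

-- ---------- B side: sortedness of the insertion sort ----------

-- lexicographic "not greater" on (distance, index), the order Source B sorts by
def Rlex (t u : Int × Int × (Int × Int) × (Int × Int)) : Prop :=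
  t.1 < u.1 ∨ (t.1 = u.1 ∧ t.2.1 ≤ u.2.1)

lemma Rlex_trans {a b c : Int × Int × (Int × Int) × (Int × Int)}
    (h1 : Rlex a b) (h2 : Rlex b c) : Rlex a c := by
  unfold Rlex at *; omega

-- the comparator sorted2 uses for keys (t.1, t.2.1)
def bf (a b : Int × Int × (Int × Int) × (Int × Int)) : Bool :=
  decide (a.1 < b.1) || (!decide (b.1 < a.1) && decide (a.2.1 < b.2.1))

lemma bf_true {a b : Int × Int × (Int × Int) × (Int × Int)} (h : bf a b = true) : Rlex a b := by
  have h' : (a.1 < b.1) ∨ (¬ (b.1 < a.1) ∧ a.2.1 < b.2.1) := by simpa [bf] using h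
  unfold Rlex; omega

lemma bf_false {a b : Int × Int × (Int × Int) × (Int × Int)} (h : bf a b = false) : Rlex b a := by
  have h' : ¬ ((a.1 < b.1) ∨ (¬ (b.1 < a.1) ∧ a.2.1 < b.2.1)) := by
    intro hco
    rw [show bf a b = true by simpa [bf] using hco] at h
    simp at h
  unfold Rlex; omega

lemma insertBy_pairwise (x : Int × Int × (Int × Int) × (Int × Int))
    (l : List (Int × Int × (Int × Int) × (Int × Int))) (hl : l.Pairwise Rlex) :
    (PySem.List.insertBy bf x l).Pairwise Rlex := by
  induction l with
  | nil => simp [PySem.List.insertBy]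
  | cons y ys ih =>
    rw [PySem.List.insertBy]
    rcases List.pairwise_cons.mp hl with ⟨hy, hys⟩
    by_cases hb : bf x y = true
    · rw [if_pos hb]
      refine List.pairwise_cons.mpr ⟨?_, hl⟩
      intro z hz
      rcases List.mem_cons.mp hz with rfl | hz
      · exact bf_true hb
      · exact Rlex_trans (bf_true hb) (hy z hz)
    · rw [if_neg hb]
      refine List.pairwise_cons.mpr ⟨?_, ih hys⟩
      intro z hz
      rcases (PySem.List.mem_insertBy bf x z ys).mp hz with rfl | hz
      · exact bf_false (Bool.eq_false_iff.mpr hb)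
      · exact hy z hz

lemma sorted2_pairwise_R (xs : List (Int × Int × (Int × Int) × (Int × Int))) :
    (PySem.List.sorted2 xs (fun t => t.1) (fun t => t.2.1) false).Pairwise Rlex := by
  have key : ∀ (l acc : List (Int × Int × (Int × Int) × (Int × Int))), acc.Pairwise Rlex →
      (l.foldl (fun acc x => PySem.List.insertBy bf x acc) acc).Pairwise Rlex := by
    intro l
    induction l with
    | nil => intro acc h; exact h
    | cons x xs ih =>
      intro acc h
      rw [List.foldl_cons]
      exact ih _ (insertBy_pairwise x acc h)
  simpa [PySem.List.sorted2, bf] using key xs [] List.Pairwise.nil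

-- ---------- B side: the first-wins sweep ----------

-- the triples Source B's sweep actually accepts, given the homes already seen
def acceptedL : List (Int × Int × (Int × Int) × (Int × Int)) → PySem.Set (Int × Int) →
    List (Int × Int × (Int × Int) × (Int × Int))
  | [], _ => []
  | t :: ts, seen =>
    if PySem.Set.contains seen t.2.2.1 then acceptedL ts seen
    else t :: acceptedL ts (PySem.Set.add seen t.2.2.1)

lemma set_contains_iff (s : PySem.Set (Int × Int)) (x : Int × Int) :
    PySem.Set.contains s x = true ↔ x ∈ s := by
  simp [PySem.Set.contains]

lemma foldl_bStep (S : List (Int × Int × (Int × Int) × (Int × Int))) :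
    ∀ (seen used : PySem.Set (Int × Int)) (tot : Int),
      S.foldl bStep (seen, used, tot)
        = (PySem.Set.update seen ((acceptedL S seen).map (fun t => t.2.2.1)),
           PySem.Set.update used ((acceptedL S seen).map (fun t => t.2.2.2)),
           tot + ((acceptedL S seen).map (fun t => t.1)).sum) := by
  induction S with
  | nil => intro seen used tot; simp [acceptedL, PySem.Set.update]
  | cons t ts ih =>
    intro seen used tot
    rw [List.foldl_cons]
    by_cases hc : PySem.Set.contains seen t.2.2.1 = true
    · have hb : bStep (seen, used, tot) t = (seen, used, tot) := by
        simp only [bStep]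
        rw [if_pos hc]
      rw [hb, ih, acceptedL, if_pos hc]
    · have hb : bStep (seen, used, tot) t
          = (PySem.Set.add seen t.2.2.1, PySem.Set.add used t.2.2.2, tot + t.1) := by
        simp only [bStep]
        rw [if_neg hc]
      rw [hb, ih, acceptedL, if_neg hc]
      simp [PySem.Set.update, add_assoc]

lemma accepted_not_seen :
    ∀ (S : List (Int × Int × (Int × Int) × (Int × Int))) (seen : PySem.Set (Int × Int)) t,
      t ∈ acceptedL S seen → t.2.2.1 ∉ seen := by
  intro S
  induction S with
  | nil => intro seen t ht; simp [acceptedL] at ht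
  | cons x xs ih =>
    intro seen t ht
    rw [acceptedL] at ht
    by_cases hc : PySem.Set.contains seen x.2.2.1 = true
    · rw [if_pos hc] at ht; exact ih seen t ht
    · rw [if_neg hc] at ht
      rcases List.mem_cons.mp ht with rfl | ht
      · exact fun hm => hc ((set_contains_iff seen t.2.2.1).mpr hm)
      · intro hm
        exact ih _ t ht ((PySem.Set.mem_add seen x.2.2.1 t.2.2.1).mpr (Or.inl hm))

lemma accepted_sub :
    ∀ (S : List (Int × Int × (Int × Int) × (Int × Int))) (seen : PySem.Set (Int × Int)) t,
      t ∈ acceptedL S seen → t ∈ S := by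
  intro S
  induction S with
  | nil => intro seen t ht; simp [acceptedL] at ht
  | cons x xs ih =>
    intro seen t ht
    rw [acceptedL] at ht
    by_cases hc : PySem.Set.contains seen x.2.2.1 = true
    · rw [if_pos hc] at ht; exact List.mem_cons_of_mem _ (ih seen t ht)
    · rw [if_neg hc] at ht
      rcases List.mem_cons.mp ht with rfl | ht
      · exact List.mem_cons_self
      · exact List.mem_cons_of_mem _ (ih _ t ht)

lemma accepted_min :
    ∀ (S : List (Int × Int × (Int × Int) × (Int × Int))) (seen : PySem.Set (Int × Int)) t,
      S.Pairwise Rlex → t ∈ acceptedL S seen →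
      ∀ u ∈ S, u.2.2.1 = t.2.2.1 → Rlex t u ∨ t = u := by
  intro S
  induction S with
  | nil => intro seen t _ ht; simp [acceptedL] at ht
  | cons x xs ih =>
    intro seen t hp ht u hu hh
    rcases List.pairwise_cons.mp hp with ⟨hx, hxs⟩
    rw [acceptedL] at ht
    by_cases hc : PySem.Set.contains seen x.2.2.1 = true
    · rw [if_pos hc] at ht
      rcases List.mem_cons.mp hu with rfl | hu
      · exfalso
        have := accepted_not_seen xs seen t ht
        rw [← hh] at this
        exact this ((set_contains_iff seen u.2.2.1).mp hc)
      · exact ih seen t hxs ht u hu hh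
    · rw [if_neg hc] at ht
      rcases List.mem_cons.mp ht with rfl | ht
      · rcases List.mem_cons.mp hu with rfl | hu
        · right; rfl
        · left; exact hx u hu
      · rcases List.mem_cons.mp hu with rfl | hu
        · exfalso
          have := accepted_not_seen xs _ t ht
          rw [← hh] at this
          exact this ((PySem.Set.mem_add seen u.2.2.1 u.2.2.1).mpr (Or.inr rfl))
        · exact ih _ t hxs ht u hu hh

lemma accepted_homes_nodup :
    ∀ (S : List (Int × Int × (Int × Int) × (Int × Int))) (seen : PySem.Set (Int × Int)),
      ((acceptedL S seen).map (fun t => t.2.2.1)).Nodup := by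
  intro S
  induction S with
  | nil => intro seen; simp [acceptedL]
  | cons x xs ih =>
    intro seen
    rw [acceptedL]
    by_cases hc : PySem.Set.contains seen x.2.2.1 = true
    · rw [if_pos hc]; exact ih seen
    · rw [if_neg hc]
      rw [List.map_cons]
      refine List.nodup_cons.mpr ⟨?_, ih _⟩
      intro hm
      rcases List.mem_map.mp hm with ⟨t, ht, he⟩
      have := accepted_not_seen xs _ t ht
      rw [he] at this
      exact this ((PySem.Set.mem_add seen x.2.2.1 x.2.2.1).mpr (Or.inr rfl))

lemma accepted_covers :
    ∀ (S : List (Int × Int × (Int × Int) × (Int × Int))) (seen : PySem.Set (Int × Int))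
      (h0 : Int × Int), (∃ t ∈ S, t.2.2.1 = h0) → h0 ∉ seen →
      ∃ t ∈ acceptedL S seen, t.2.2.1 = h0 := by
  intro S
  induction S with
  | nil => rintro seen h0 ⟨t, ht, _⟩ _; simp at ht
  | cons x xs ih =>
    rintro seen h0 ⟨t, ht, hth⟩ hns
    rw [acceptedL]
    by_cases hc : PySem.Set.contains seen x.2.2.1 = true
    · rw [if_pos hc]
      rcases List.mem_cons.mp ht with rfl | ht
      · exact absurd ((set_contains_iff seen t.2.2.1).mp hc) (hth ▸ hns)
      · exact ih seen h0 ⟨t, ht, hth⟩ hns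
    · rw [if_neg hc]
      by_cases hxh : x.2.2.1 = h0
      · exact ⟨x, List.mem_cons_self, hxh⟩
      · rcases List.mem_cons.mp ht with rfl | ht
        · exact absurd hth hxh
        · have hns' : h0 ∉ PySem.Set.add seen x.2.2.1 := by
            intro hm
            rcases (PySem.Set.mem_add seen x.2.2.1 h0).mp hm with hm | hm
            · exact hns hm
            · exact hxh hm.symm
          rcases ih _ h0 ⟨t, ht, hth⟩ hns' with ⟨u, hu, huh⟩
          exact ⟨u, List.mem_cons_of_mem _ hu, huh⟩

-- ---------- aggregation shapes ----------

lemma foldl_set_sum {β : Type} (f : β → Int × Int) (g : β → Int) (l : List β) :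
    ∀ (s : PySem.Set (Int × Int)) (t : Int),
      l.foldl (fun acc x => (PySem.Set.add acc.1 (f x), acc.2 + g x)) (s, t)
        = (PySem.Set.update s (l.map f), t + (l.map g).sum) := by
  induction l with
  | nil => intro s t; simp [PySem.Set.update]
  | cons x xs ih =>
    intro s t
    rw [List.foldl_cons, ih]
    simp [PySem.Set.update, add_assoc]

lemma update_empty (l : List (Int × Int)) :
    PySem.Set.update PySem.Set.empty l = PySem.Set.ofList l := by
  rw [PySem.Set.ofList_eq_foldl]; rfl

lemma ofList_len_perm {l1 l2 : List (Int × Int)} (hp : l1.Perm l2) :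
    (PySem.Set.ofList l1).length = (PySem.Set.ofList l2).length := by
  have : (PySem.Set.ofList l1).Perm (PySem.Set.ofList l2) := by
    rw [List.perm_ext_iff_of_nodup (PySem.Set.nodup_ofList l1) (PySem.Set.nodup_ofList l2)]
    intro a
    rw [PySem.Set.mem_ofList, PySem.Set.mem_ofList]
    exact hp.mem_iff
  exact this.length_eq

-- ===== VERDICT (by name: the statement is the Claim_ definition above) =====
theorem dist_chicken_spec : Claim_equal_dist_chicken := by
  intro homes chickens _
  unfold Spec_dist_chicken
  cases chickens with
  | nil =>
    have hT : bTriples homes [] = [] := by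
      apply List.flatMap_eq_nil_iff.mpr
      intro h _
      rfl
    simp only [dist_chicken, dist_chicken_alt, List.foldl_nil, hT]
    have : homes.foldl (fun dic _ => dic)
        (PySem.Dict.empty : PySem.Dict (Int × Int) (Int × Int × Int)) = PySem.Dict.empty :=
      List.foldl_fixed _
    rw [this]; rfl
  | cons c cs =>
    -- names
    set S := PySem.List.sorted2 (bTriples homes (c :: cs)) (fun t => t.1) (fun t => t.2.1) false with hS
    have hSperm : S.Perm (bTriples homes (c :: cs)) :=
      PySem.List.sorted2_perm (bTriples homes (c :: cs)) (fun t => t.1) (fun t => t.2.1) false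
    have hSpair : S.Pairwise Rlex := sorted2_pairwise_R (bTriples homes (c :: cs))
    set AC := acceptedL S PySem.Set.empty with hAC
    -- every accepted triple is midT of its home, and its home is in dedup homes
    have haccept : ∀ t ∈ AC, t.2.2.1 ∈ PySem.List.dedup homes ∧ t = midT t.2.2.1 c cs := by
      intro t ht
      have htS : t ∈ S := accepted_sub S _ t ht
      have htT : t ∈ bTriples homes (c :: cs) := hSperm.mem_iff.mp htS
      rcases List.mem_flatMap.mp htT with ⟨h, hhd, hth⟩
      have hhome : t.2.2.1 = h := hTrip_home hth
      subst hhome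
      refine ⟨hhd, ?_⟩
      -- midT is in S with the same home
      have hmidT : midT t.2.2.1 c cs ∈ S := by
        apply hSperm.mem_iff.mpr
        exact List.mem_flatMap.mpr ⟨t.2.2.1, hhd, midT_mem t.2.2.1 c cs⟩
      have hmidH : (midT t.2.2.1 c cs).2.2.1 = t.2.2.1 := rfl
      rcases accepted_min S _ t hSpair ht (midT t.2.2.1 c cs) hmidT hmidH with hR | he
      · -- R t midT and R midT t force equality
        have hR2 : Rlex (midT t.2.2.1 c cs) t := by
          rcases midT_min t.2.2.1 c cs t hth with hlt | ⟨he, hi⟩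
          · exact Or.inl hlt
          · exact Or.inr ⟨he, hi⟩
        have hi : t.2.1 = (midT t.2.2.1 c cs).2.1 := by
          unfold Rlex at hR hR2; omega
        exact hTrip_inj_i hth (midT_mem t.2.2.1 c cs) hi
      · exact he
    -- the accepted homes are a permutation of the distinct homes
    have hhomesperm : (AC.map (fun t => t.2.2.1)).Perm (PySem.List.dedup homes) := by
      rw [List.perm_ext_iff_of_nodup (accepted_homes_nodup S _) (PySem.List.nodup_dedup homes)]
      intro h0
      constructor
      · intro hm
        rcases List.mem_map.mp hm with ⟨t, ht, he⟩
        exact he ▸ (haccept t ht).1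
      · intro hm
        have hw : ∃ t ∈ S, t.2.2.1 = h0 := by
          refine ⟨midT h0 c cs, ?_, rfl⟩
          exact hSperm.mem_iff.mpr (List.mem_flatMap.mpr ⟨h0, hm, midT_mem h0 c cs⟩)
        rcases accepted_covers S PySem.Set.empty h0 hw (by simp [PySem.Set.empty]) with ⟨t, ht, he⟩
        exact List.mem_map.mpr ⟨t, ht, he⟩
    -- evaluate both programs
    rw [show dist_chicken homes (c :: cs)
        = (((((homes.foldl (fun dic h => (c :: cs).foldl (aInner h) dic)
              PySem.Dict.empty).items.foldl
            (fun acc kv => (PySem.Set.add acc.1 (kv.2.1, kv.2.2.1), acc.2 + kv.2.2.2))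
            (PySem.Set.empty, 0)).1.length : Int)),
           ((homes.foldl (fun dic h => (c :: cs).foldl (aInner h) dic)
              PySem.Dict.empty).items.foldl
            (fun acc kv => (PySem.Set.add acc.1 (kv.2.1, kv.2.2.1), acc.2 + kv.2.2.2))
            (PySem.Set.empty, 0)).2) from rfl]
    rw [build_items c cs homes]
    rw [foldl_set_sum (fun kv : (Int × Int) × (Int × Int × Int) => (kv.2.1, kv.2.2.1))
      (fun kv : (Int × Int) × (Int × Int × Int) => kv.2.2.2)
      ((PySem.List.dedup homes).map (fun h => (h, bestT h c cs))) PySem.Set.empty 0]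
    rw [show dist_chicken_alt homes (c :: cs)
        = (((S.foldl bStep (PySem.Set.empty, PySem.Set.empty, 0)).2.1.length : Int),
           (S.foldl bStep (PySem.Set.empty, PySem.Set.empty, 0)).2.2) from rfl]
    rw [foldl_bStep S PySem.Set.empty PySem.Set.empty 0]
    simp only [List.map_map, Function.comp_def, update_empty]
    -- reduce A's per-home data to midE
    have hAc : (PySem.List.dedup homes).map (fun h => ((bestT h c cs).1, (bestT h c cs).2.1))
        = (PySem.List.dedup homes).map (fun h => (midE h c cs).2.2) := by
      apply List.map_congr_left
      intro h _
      rw [bestT_eq_midE]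
    have hAd : (PySem.List.dedup homes).map (fun h => (bestT h c cs).2.2)
        = (PySem.List.dedup homes).map (fun h => (midE h c cs).1) := by
      apply List.map_congr_left
      intro h _
      rw [bestT_eq_midE]
    -- rewrite B's accepted data through its homes
    have hBc : AC.map (fun t => t.2.2.2)
        = (AC.map (fun t => t.2.2.1)).map (fun h => (midE h c cs).2.2) := by
      rw [List.map_map]
      apply List.map_congr_left
      intro t ht
      rw [(haccept t ht).2]
      rfl
    have hBd : AC.map (fun t => t.1)
        = (AC.map (fun t => t.2.2.1)).map (fun h => (midE h c cs).1) := by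
      rw [List.map_map]
      apply List.map_congr_left
      intro t ht
      rw [(haccept t ht).2]
      rfl
    have hpc : ((AC.map (fun t => t.2.2.1)).map (fun h => (midE h c cs).2.2)).Perm
        ((PySem.List.dedup homes).map (fun h => (midE h c cs).2.2)) := hhomesperm.map _
    have hpd : ((AC.map (fun t => t.2.2.1)).map (fun h => (midE h c cs).1)).Perm
        ((PySem.List.dedup homes).map (fun h => (midE h c cs).1)) := hhomesperm.map _
    rw [Prod.mk.injEq]
    constructor
    · rw [hAc, ← hAC, hBc, ofList_len_perm hpc]
    · rw [hAd, ← hAC, hBd, hpd.sum_eq]
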